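-- pv_equiv track=rewrite | github.com/Ahnti/cheesy | main.py | get_chord
-- ===== SOURCE A (Python) =====
-- major_degrees = ["I", "ii", "iii", "IV", "V", "vi", "vii"]
--
-- minor_degrees = ["i", "ii°", "III", "iv", "v", "VI", "VII"]
--
-- notes_sharp = ['C', 'C#', 'D', 'D#', 'E', 'F', 'F#', 'G', 'G#', 'A', 'A#', 'B']
--
-- notes_flat = ['C', 'Db', 'D', 'Eb', 'E', 'F', 'Gb', 'G', 'Ab', 'A', 'Bb', 'B']
--
-- def get_scale(root, scale_type):
--     """Bunch of bullshit"""
--     chromatic = notes_sharp if '#' in root or 'E' in root else notes_flat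
--     start_index = chromatic.index(root)
--
--     if scale_type == 'M':  # major
--         steps = [2, 2, 1, 2, 2, 2, 1]
--     else:  # minor
--         steps = [2, 1, 2, 2, 1, 2, 2]
--
--     scale = [root]
--     index = start_index
--     for step in steps:
--         index = (index + step) % 12
--         scale.append(chromatic[index])
--     return scale[:-1]  # Remove octave repeat
--
-- def get_chord(root, scale_type, degree):
--     """Returns the chord at the specified degree in the scale."""
--     scale = get_scale(root, scale_type)
--
--     degree_input = degree.lower()
--     degree_list = []
--
--     match_found = False
--     for deg in major_degrees:
--         if deg.lower().startswith(degree_input):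
--             degree_list = major_degrees
--             match_found = True
--             break
--
--     if not match_found:
--         for deg in minor_degrees:
--             if deg.lower().startswith(degree_input):
--                 degree_list = minor_degrees
--                 match_found = True
--                 break
--
--     if scale_type == 'M':
--         qualities = ['M', 'm', 'm', 'M', 'M', 'm', 'dim']
--         degree_list = major_degrees
--     else:
--         qualities = ['m', 'dim', 'M', 'm', 'm', 'M', 'M']
--         degree_list = minor_degrees
--
--     index = next((i for i, deg in enumerate(degree_list) if deg.lower().startswith(degree_input)), None)
--     if index is None:
--         return "tf kinda degree is that"
--
--     chord_root = scale[index]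
--     quality = qualities[index]
--
--     if quality == 'M':
--         return f"{chord_root} major"
--     elif quality == 'm':
--         return f"{chord_root} minor"
--     else:
--         return f"{chord_root} diminished"
-- ===== SOURCE B (Python) =====
-- major_degrees = ["I", "ii", "iii", "IV", "V", "vi", "vii"]
-- minor_degrees = ["i", "ii°", "III", "iv", "v", "VI", "VII"]
-- notes_sharp = ['C', 'C#', 'D', 'D#', 'E', 'F', 'F#', 'G', 'G#', 'A', 'A#', 'B']
-- notes_flat = ['C', 'Db', 'D', 'Eb', 'E', 'F', 'Gb', 'G', 'Ab', 'A', 'Bb', 'B']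
--
-- _NAMES = {'M': ' major', 'm': ' minor', 'dim': ' diminished'}
--
-- def get_chord(root, scale_type, degree):
--     """Returns the chord at the specified degree in the scale."""
--     chromatic = notes_sharp if '#' in root or 'E' in root else notes_flat
--     start = chromatic.index(root)  # ValueError on an unknown root, before any degree handling
--     if scale_type == 'M':
--         offsets = [0, 2, 4, 5, 7, 9, 11]
--         degree_list = major_degrees
--         qualities = ['M', 'm', 'm', 'M', 'M', 'm', 'dim']
--     else:
--         offsets = [0, 2, 3, 5, 7, 8, 10]
--         degree_list = minor_degrees
--         qualities = ['m', 'dim', 'M', 'm', 'm', 'M', 'M']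
--     degree_input = degree.lower()
--     for i, deg in enumerate(degree_list):
--         if deg.lower().startswith(degree_input):
--             return chromatic[(start + offsets[i]) % 12] + _NAMES[qualities[i]]
--     return "tf kinda degree is that"
-- ===== Notes on version B (the rewrite author's own statement) =====
-- stated objective: simpler
-- what changed: B deletes A's two dead degree-matching pre-loops and replaces the step-accumulating scale-list construction with a fixed per-scale-type semitone-offset table, reading the chord root directly as chromatic[(start + offset) % 12] in a single first-match loop over the degree list.
import Mathlib
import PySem

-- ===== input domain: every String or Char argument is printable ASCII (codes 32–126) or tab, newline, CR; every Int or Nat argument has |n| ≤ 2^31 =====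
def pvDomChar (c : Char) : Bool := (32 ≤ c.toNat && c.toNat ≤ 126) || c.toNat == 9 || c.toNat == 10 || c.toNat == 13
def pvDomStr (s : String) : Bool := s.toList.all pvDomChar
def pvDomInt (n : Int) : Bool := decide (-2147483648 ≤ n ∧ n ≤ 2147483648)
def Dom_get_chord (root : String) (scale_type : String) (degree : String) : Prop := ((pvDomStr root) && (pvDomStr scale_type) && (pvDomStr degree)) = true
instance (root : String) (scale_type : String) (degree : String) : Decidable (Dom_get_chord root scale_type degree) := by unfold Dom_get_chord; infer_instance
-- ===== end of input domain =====

-- B drops A's dead pre-loops and the step-accumulated scale list, reading the chord root off a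
-- closed-form semitone-offset table instead (objective: simpler; same behaviour, including the
-- ValueError on an unknown root, which Pre_ excludes).

-- module constants shared by both versions
def pvMajorDegrees : List String := ["I", "ii", "iii", "IV", "V", "vi", "vii"]
def pvMinorDegrees : List String := ["i", "ii°", "III", "iv", "v", "VI", "VII"]
def pvNotesSharp : List String := ["C", "C#", "D", "D#", "E", "F", "F#", "G", "G#", "A", "A#", "B"]
def pvNotesFlat : List String := ["C", "Db", "D", "Eb", "E", "F", "Gb", "G", "Ab", "A", "Bb", "B"]

-- ===== PORT A =====
-- get_scale; 'none' = chromatic.index(root) raises ValueError (excluded by Pre_)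
def get_scaleA (root : String) (scale_type : String) : Option (List String) :=
  let chromatic := if PySem.Str.isIn "#" root || PySem.Str.isIn "E" root then pvNotesSharp else pvNotesFlat
  match PySem.List.index? chromatic root with
  | none => none
  | some start_index =>
    let steps : List Int := if scale_type == "M" then [2, 2, 1, 2, 2, 2, 1] else [2, 1, 2, 2, 1, 2, 2]
    let st := steps.foldl (fun (acc : List String × Int) step =>
        let index := PySem.Int.mod (acc.2 + step) 12
        (acc.1 ++ [PySem.List.pyGetD chromatic index ""], index)) ([root], (start_index : Int))
    some (PySem.List.slice st.1 none (some (-1)))   -- scale[:-1]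

def get_chord (root : String) (scale_type : String) (degree : String) : String :=
  match get_scaleA root scale_type with
  | none => ""   -- unreachable under Pre_: Python raises ValueError here
  | some scale =>
    let degree_input := PySem.Str.lower degree
    let p := fun deg => PySem.Str.startswith (PySem.Str.lower deg) degree_input
    -- A's two dead pre-loops, transliterated (their result is overwritten below, as in A)
    let r1 := if pvMajorDegrees.any p then (pvMajorDegrees, true) else (([] : List String), false)
    let _r2 := if !r1.2 then (if pvMinorDegrees.any p then (pvMinorDegrees, true) else r1) else r1
    let ql := if scale_type == "M" then ((["M", "m", "m", "M", "M", "m", "dim"] : List String), pvMajorDegrees)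
              else ((["m", "dim", "M", "m", "m", "M", "M"] : List String), pvMinorDegrees)
    match ql.2.findIdx? p with   -- next((i for i, deg in enumerate(degree_list) if …), None)
    | none => "tf kinda degree is that"
    | some index =>
      let chord_root := PySem.List.pyGetD scale (index : Int) ""
      let quality := PySem.List.pyGetD ql.1 (index : Int) ""
      if quality == "M" then chord_root ++ " major"
      else if quality == "m" then chord_root ++ " minor"
      else chord_root ++ " diminished"

-- ===== PORT B =====
def pvNames : PySem.Dict String String :=
  PySem.Dict.ofList [("M", " major"), ("m", " minor"), ("dim", " diminished")]

def get_chord_alt (root : String) (scale_type : String) (degree : String) : String :=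
  let chromatic := if PySem.Str.isIn "#" root || PySem.Str.isIn "E" root then pvNotesSharp else pvNotesFlat
  match PySem.List.index? chromatic root with
  | none => ""   -- unreachable under Pre_: Python raises ValueError here
  | some start =>
    let t := if scale_type == "M"
      then (([0, 2, 4, 5, 7, 9, 11] : List Int), pvMajorDegrees, (["M", "m", "m", "M", "M", "m", "dim"] : List String))
      else (([0, 2, 3, 5, 7, 8, 10] : List Int), pvMinorDegrees, (["m", "dim", "M", "m", "m", "M", "M"] : List String))
    let degree_input := PySem.Str.lower degree
    match t.2.1.findIdx? (fun deg => PySem.Str.startswith (PySem.Str.lower deg) degree_input) with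
    | none => "tf kinda degree is that"
    | some i =>
      PySem.List.pyGetD chromatic (PySem.Int.mod ((start : Int) + PySem.List.pyGetD t.1 (i : Int) 0) 12) ""
        ++ PySem.Dict.getD pvNames (PySem.List.pyGetD t.2.2 (i : Int) "") ""

-- ===== PRECONDITION & SPEC =====
-- Pre_ excludes exactly the roots chromatic.index(root) cannot find, where A (and B) raise ValueError.
def Pre_get_chord (root : String) (scale_type : String) (degree : String) : Prop :=
  root ∈ (if PySem.Str.isIn "#" root || PySem.Str.isIn "E" root then pvNotesSharp else pvNotesFlat)
instance (root : String) (scale_type : String) (degree : String) : Decidable (Pre_get_chord root scale_type degree) := by unfold Pre_get_chord; infer_instance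

def pvWitness_get_chord : String × String × String := ("C", "M", "v")

def Spec_get_chord (root : String) (scale_type : String) (degree : String) (out : String) : Prop := out = get_chord_alt root scale_type degree
instance (root : String) (scale_type : String) (degree : String) (out : String) : Decidable (Spec_get_chord root scale_type degree out) := by unfold Spec_get_chord; infer_instance

-- ===== CLAIM (what is proved, stated in full; the proofs are below) =====
def Claim_equal_get_chord : Prop := ∀ (root : String) (scale_type : String) (degree : String), Dom_get_chord root scale_type degree → Pre_get_chord root scale_type degree → Spec_get_chord root scale_type degree (get_chord root scale_type degree)

-- ===== LEMMAS AND PROOFS =====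
theorem get_chord_eq (root scale_type degree : String) (hpre : Pre_get_chord root scale_type degree) :
    get_chord root scale_type degree = get_chord_alt root scale_type degree := by
  unfold Pre_get_chord at hpre
  by_cases hc : (PySem.Str.isIn "#" root || PySem.Str.isIn "E" root) = true
  · rw [if_pos hc] at hpre
    unfold pvNotesSharp at hpre
    fin_cases hpre <;>
      (by_cases hm : (scale_type == "M") = true
       · simp only [get_chord, get_chord_alt, get_scaleA, hm, hc, if_true, List.foldl]
         cases hidx : pvMajorDegrees.findIdx? (fun deg => PySem.Str.startswith (PySem.Str.lower deg) (PySem.Str.lower degree)) with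
         | none => rfl
         | some i =>
           have hi : i < 7 := (List.findIdx?_eq_some_iff_getElem.mp hidx).1
           interval_cases i <;> decide
       · rw [Bool.not_eq_true] at hm
         simp only [get_chord, get_chord_alt, get_scaleA, hm, hc, if_true, Bool.false_eq_true, if_false, List.foldl]
         cases hidx : pvMinorDegrees.findIdx? (fun deg => PySem.Str.startswith (PySem.Str.lower deg) (PySem.Str.lower degree)) with
         | none => rfl
         | some i =>
           have hi : i < 7 := (List.findIdx?_eq_some_iff_getElem.mp hidx).1
           interval_cases i <;> decide)
  · rw [if_neg hc] at hpre
    unfold pvNotesFlat at hpre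
    rw [Bool.not_eq_true] at hc
    fin_cases hpre <;>
      (by_cases hm : (scale_type == "M") = true
       · simp only [get_chord, get_chord_alt, get_scaleA, hm, hc, if_true, Bool.false_eq_true, if_false, List.foldl]
         cases hidx : pvMajorDegrees.findIdx? (fun deg => PySem.Str.startswith (PySem.Str.lower deg) (PySem.Str.lower degree)) with
         | none => rfl
         | some i =>
           have hi : i < 7 := (List.findIdx?_eq_some_iff_getElem.mp hidx).1
           interval_cases i <;> decide
       · rw [Bool.not_eq_true] at hm
         simp only [get_chord, get_chord_alt, get_scaleA, hm, hc, Bool.false_eq_true, if_false, List.foldl]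
         cases hidx : pvMinorDegrees.findIdx? (fun deg => PySem.Str.startswith (PySem.Str.lower deg) (PySem.Str.lower degree)) with
         | none => rfl
         | some i =>
           have hi : i < 7 := (List.findIdx?_eq_some_iff_getElem.mp hidx).1
           interval_cases i <;> decide)
-- ===== VERDICT (by name: the statement is the Claim_ definition above) =====
theorem get_chord_spec : Claim_equal_get_chord := by
  intro root scale_type degree _hdom hpre
  unfold Spec_get_chord
  exact get_chord_eq root scale_type degree hpre
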